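-- pv_equiv track=rewrite | github.com/smohapatra1/scripting | python/practice/start_again/2025/07092025/rearrange_strings_and_integers.py | rearrange_strings_sorted
-- ===== SOURCE A (Python) =====
-- def rearrange_strings_sorted(input_string):
--     letters = []
--     numbers = []
--     for char in input_string:
--         if char.isalpha():
--             letters.append(char)
--         elif char.isdigit():
--             numbers.append(int(char))
--     sorted_letters = sorted(letters)
--     sorted_numbers = sorted(numbers)
--     sorted_num_str = [str(num) for num in sorted_numbers]
--     result = "".join(sorted_letters) + "".join(sorted_num_str)
--     return result
-- ===== SOURCE B (Python) =====
-- def rearrange_strings_sorted(input_string):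
--     # counting sort over the fixed 62-symbol alphabet: one count per symbol, buckets emitted in sorted order
--     order = [chr(o) for o in range(65, 91)] + [chr(o) for o in range(97, 123)] + [chr(o) for o in range(48, 58)]
--     return ''.join(ch * input_string.count(ch) for ch in order)
-- ===== Notes on version B (the rewrite author's own statement) =====
-- stated objective: faster
-- what changed: Replaces A's filtering loop plus two comparison sorts by a counting sort over the fixed 62-symbol alphabet: one count per letter/digit symbol, then the buckets are emitted in the alphabet's sorted order.
import Mathlib
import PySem

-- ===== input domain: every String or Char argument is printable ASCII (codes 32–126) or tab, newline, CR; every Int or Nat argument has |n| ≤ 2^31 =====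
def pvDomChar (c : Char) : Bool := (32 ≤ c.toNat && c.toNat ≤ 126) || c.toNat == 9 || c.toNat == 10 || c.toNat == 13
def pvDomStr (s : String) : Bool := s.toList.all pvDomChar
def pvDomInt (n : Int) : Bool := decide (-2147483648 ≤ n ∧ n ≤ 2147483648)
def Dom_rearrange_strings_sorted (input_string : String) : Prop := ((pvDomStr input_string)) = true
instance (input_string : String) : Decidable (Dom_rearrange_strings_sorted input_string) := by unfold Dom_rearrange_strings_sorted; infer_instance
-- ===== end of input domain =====

-- B (objective: faster, measured) replaces A's two comparison sorts by a counting sort over the fixed 62-symbol alphabet.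

-- ===== PORT A =====
-- int(char) under the isdigit guard; .getD 0 is only a totality guard (ofChars? is some on every digit char)
def pvVal (c : Char) : Int := (PySem.Int.ofChars? [c]).getD 0

def rearrange_strings_sorted (input_string : String) : String :=
  let p := input_string.toList.foldl
    (fun (acc : List Char × List Int) char =>
      if PySem.Chars.isalpha char then (acc.1 ++ [char], acc.2)
      else if PySem.Chars.isdigit char then (acc.1, acc.2 ++ [pvVal char])
      else acc) ([], [])
  let sorted_letters := PySem.List.sorted p.1 (fun x => x) false
  let sorted_numbers := PySem.List.sorted p.2 (fun x => x) false
  let sorted_num_str := sorted_numbers.map PySem.Int.toChars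
  String.ofList (PySem.Chars.join [] (sorted_letters.map (fun c => [c])) ++ PySem.Chars.join [] sorted_num_str)

-- ===== PORT B =====
-- [chr(o) for o in range(65, 91)] + [chr(o) for o in range(97, 123)] + [chr(o) for o in range(48, 58)]
def pvOrder : List Char :=
  (PySem.List.pyRange 65 91 1).map (fun o => Char.ofNat o.toNat)
  ++ (PySem.List.pyRange 97 123 1).map (fun o => Char.ofNat o.toNat)
  ++ (PySem.List.pyRange 48 58 1).map (fun o => Char.ofNat o.toNat)

def rearrange_strings_sorted_alt (input_string : String) : String :=
  String.ofList (pvOrder.foldl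
    (fun acc ch => acc ++ List.replicate (PySem.Str.count input_string (String.ofList [ch])) ch) [])

-- ===== PRECONDITION & SPEC =====
def Spec_rearrange_strings_sorted (input_string : String) (out : String) : Prop := out = rearrange_strings_sorted_alt input_string
instance (input_string : String) (out : String) : Decidable (Spec_rearrange_strings_sorted input_string out) := by unfold Spec_rearrange_strings_sorted; infer_instance

-- ===== CLAIM (what is proved, stated in full; the proofs are below) =====
def Claim_equal_rearrange_strings_sorted : Prop := ∀ (input_string : String), Dom_rearrange_strings_sorted input_string → Spec_rearrange_strings_sorted input_string (rearrange_strings_sorted input_string)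

-- ===== LEMMAS AND PROOFS =====

-- character-class facts (PySem's str predicates are ASCII-exact ranges)
lemma pv_isdigit_iff (c : Char) : PySem.Chars.isdigit c = true ↔ 48 ≤ c.toNat ∧ c.toNat ≤ 57 := by
  rw [PySem.Chars.isdigit, Bool.and_eq_true, decide_eq_true_iff, decide_eq_true_iff,
      Char.le_def, Char.le_def, UInt32.le_iff_toNat_le, UInt32.le_iff_toNat_le]
  exact Iff.rfl

lemma pv_isalpha_iff (c : Char) : PySem.Chars.isalpha c = true ↔ (65 ≤ c.toNat ∧ c.toNat ≤ 90) ∨ (97 ≤ c.toNat ∧ c.toNat ≤ 122) := by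
  rw [PySem.Chars.isalpha, PySem.Chars.isupper, PySem.Chars.islower, Bool.or_eq_true,
      Bool.and_eq_true, Bool.and_eq_true]
  simp only [decide_eq_true_iff, Char.le_def, UInt32.le_iff_toNat_le]
  exact Iff.rfl

lemma pv_alpha_not_digit {c : Char} (h : PySem.Chars.isalpha c = true) : PySem.Chars.isdigit c = false := by
  rw [← Bool.not_eq_true, pv_isdigit_iff]
  rw [pv_isalpha_iff] at h
  omega

-- the value int(c) computes on a digit character
lemma pv_val_digit {c : Char} (h : PySem.Chars.isdigit c = true) : pvVal c = (c.toNat : Int) - 48 := by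
  rw [pv_isdigit_iff] at h
  obtain ⟨h1, h2⟩ := h
  have hc : c = Char.ofNat c.toNat := (Char.ofNat_toNat c).symm
  rw [hc]
  interval_cases h3 : c.toNat <;> decide

-- the A-side fold separates letters and digit values
lemma pv_foldA (l : List Char) (L : List Char) (N : List Int) :
    l.foldl (fun (acc : List Char × List Int) char =>
      if PySem.Chars.isalpha char then (acc.1 ++ [char], acc.2)
      else if PySem.Chars.isdigit char then (acc.1, acc.2 ++ [pvVal char])
      else acc) (L, N)
    = (L ++ l.filter PySem.Chars.isalpha, N ++ (l.filter PySem.Chars.isdigit).map pvVal) := by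
  induction l generalizing L N with
  | nil => simp
  | cons c rest ih =>
    simp only [List.foldl_cons, List.filter_cons]
    by_cases ha : PySem.Chars.isalpha c = true
    · rw [ha, pv_alpha_not_digit ha]
      simp only [if_true, Bool.false_eq_true, if_false, ih]
      simp
    · rw [Bool.not_eq_true] at ha
      rw [ha]
      by_cases hd : PySem.Chars.isdigit c = true
      · simp only [hd, Bool.false_eq_true, if_false, if_true, ih]
        simp
      · rw [Bool.not_eq_true] at hd
        rw [hd]
        simp only [Bool.false_eq_true, if_false, ih]

-- membership in a mapped range of valid character codes
lemma pv_mem_map_ofNat_range' (a n : Nat) (hn : a + n ≤ 127) (c : Char) :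
    c ∈ (List.range' a n).map Char.ofNat ↔ a ≤ c.toNat ∧ c.toNat < a + n := by
  simp only [List.mem_map, List.mem_range'_1]
  constructor
  · rintro ⟨m, hm, rfl⟩
    have hv : (Char.ofNat m).toNat = m := by
      rw [Char.toNat_ofNat, if_pos]; exact Or.inl (by omega)
    omega
  · rintro ⟨h1, h2⟩
    exact ⟨c.toNat, by omega, Char.ofNat_toNat c⟩

-- counting in a flatMap of replicates over a duplicate-free index list
lemma pv_count_flatMap_replicate {κ : Type} [DecidableEq κ] (order : List κ) (n : κ → Nat) (a : κ)
    (hnd : order.Nodup) :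
    ((order.flatMap (fun c => List.replicate (n c) c)).count a) = if a ∈ order then n a else 0 := by
  induction order with
  | nil => simp
  | cons c rest ih =>
    rcases List.nodup_cons.mp hnd with ⟨hc, hrest⟩
    simp only [List.flatMap_cons, List.count_append, List.count_replicate, ih hrest, List.mem_cons]
    by_cases h : a = c
    · subst h
      simp [hc]
    · simp [h, Ne.symm h, beq_iff_eq]

lemma pv_pairwise_flatMap_replicate {κ : Type} [LinearOrder κ] (order : List κ) (n : κ → Nat)
    (h : order.Pairwise (· < ·)) :
    (order.flatMap (fun c => List.replicate (n c) c)).Pairwise (· ≤ ·) := by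
  induction order with
  | nil => simp
  | cons c rest ih =>
    rcases List.pairwise_cons.mp h with ⟨hc, hrest⟩
    simp only [List.flatMap_cons]
    rw [List.pairwise_append]
    refine ⟨?_, ih hrest, ?_⟩
    · rw [List.pairwise_replicate]; right; exact le_refl c
    · intro x hx y hy
      have hxc : x = c := List.eq_of_mem_replicate hx
      rcases List.mem_flatMap.mp hy with ⟨d, hd, hyd⟩
      have hyd' : y = d := List.eq_of_mem_replicate hyd
      subst hxc; subst hyd'
      exact le_of_lt (hc _ hd)

-- the canonical form of sorted(xs) when all elements lie in a strictly increasing 'order'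
lemma pv_sorted_id_flatMap {κ : Type} [LinearOrder κ] [DecidableEq κ] (xs order : List κ)
    (hsort : order.Pairwise (· < ·)) (hmem : ∀ x ∈ xs, x ∈ order) :
    PySem.List.sorted xs (fun x => x) false = order.flatMap (fun c => List.replicate (xs.count c) c) := by
  apply PySem.List.sorted_id_eq_of_perm_of_pairwise
  · rw [List.perm_iff_count]
    intro a
    rw [pv_count_flatMap_replicate order _ a (List.Pairwise.nodup hsort)]
    by_cases h : a ∈ order
    · simp [h]
    · simp [h]
      exact (List.count_eq_zero.mpr (fun ha => h (hmem a ha))).symm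
  · exact pv_pairwise_flatMap_replicate order _ hsort

lemma pv_flatMap_congr {α β : Type} (xs : List α) (f g : α → List β) (h : ∀ a ∈ xs, f a = g a) :
    xs.flatMap f = xs.flatMap g := by
  induction xs with
  | nil => rfl
  | cons x rest ih =>
    simp only [List.flatMap_cons, h x (List.mem_cons_self), ih (fun a ha => h a (List.mem_cons_of_mem _ ha))]

-- counting digit values against counting digit characters
lemma pv_count_map_val (l : List Char) (d : Char) (hd : PySem.Chars.isdigit d = true) :
    ((l.filter PySem.Chars.isdigit).map pvVal).count (pvVal d) = l.count d := by
  induction l with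
  | nil => rfl
  | cons c rest ih =>
    rw [List.filter_cons, List.count_cons]
    by_cases hc : PySem.Chars.isdigit c = true
    · rw [hc, if_pos rfl, List.map_cons, List.count_cons, ih]
      congr 1
      have : (pvVal c == pvVal d) = (c == d) := by
        rw [Bool.eq_iff_iff, beq_iff_eq, beq_iff_eq]
        constructor
        · intro h
          rw [pv_val_digit hc, pv_val_digit hd] at h
          have : c.toNat = d.toNat := by omega
          rw [← Char.ofNat_toNat c, ← Char.ofNat_toNat d, this]
        · intro h; rw [h]
      rw [this]
    · rw [Bool.not_eq_true] at hc
      rw [hc]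
      simp only [Bool.false_eq_true, if_false]
      rw [ih]
      have hne : (c == d) = false := by
        rw [beq_eq_false_iff_ne]
        rintro rfl
        rw [hd] at hc
        cases hc
      rw [hne]
      simp

-- B's bucket order, split into its letter and digit halves
def pvLchars : List Char := (List.range' 65 26).map Char.ofNat ++ (List.range' 97 26).map Char.ofNat
def pvDchars : List Char := (List.range' 48 10).map Char.ofNat

lemma pv_order_split : pvOrder = pvLchars ++ pvDchars := by decide

lemma pv_join_nil_flatten (xss : List (List Char)) : PySem.Chars.join [] xss = xss.flatten := by
  induction xss with
  | nil => rfl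
  | cons x xs ih =>
    cases xs with
    | nil => simp [PySem.Chars.join, List.intercalate]
    | cons y ys =>
      rw [PySem.Chars.join_cons_cons] at *
      simp_all

lemma pv_flatten_map_singleton (l : List Char) : (l.map (fun c => [c])).flatten = l := by
  induction l with
  | nil => rfl
  | cons c rest ih => simp [ih]


-- str.count with a single-character needle is List.count
lemma pv_count_go_single (c : Char) : ∀ (l : List Char) (fuel acc : Nat), l.length ≤ fuel →
    PySem.Chars.count.go [c] fuel l acc = acc + l.count c := by
  intro l
  induction l with
  | nil => intro fuel acc _; cases fuel <;> simp [PySem.Chars.count.go]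
  | cons h t ih =>
    intro fuel acc hf
    cases fuel with
    | zero => simp at hf
    | succ n =>
      rw [PySem.Chars.count.go]
      by_cases hc : c = h
      · subst hc
        simp only [List.isPrefixOf, beq_self_eq_true, Bool.true_and, if_true]
        simp only [List.length_cons] at hf
        show PySem.Chars.count.go [c] n (List.drop 1 (c :: t)) (acc + 1) = _
        rw [List.drop_one, List.tail_cons, ih n (acc+1) (by omega), List.count_cons_self]
        omega
      · have : ([c].isPrefixOf (h :: t)) = false := by
          simp [List.isPrefixOf, hc]
        rw [this]
        simp only [Bool.false_eq_true, if_false]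
        simp only [List.length_cons] at hf
        rw [ih n acc (by omega), List.count_cons_of_ne (by exact fun hh => hc hh.symm)]

lemma pv_count_single (l : List Char) (c : Char) : PySem.Chars.count l [c] = l.count c := by
  rw [PySem.Chars.count]
  simp only [List.isEmpty_cons, Bool.false_eq_true, if_false]
  rw [pv_count_go_single c l l.length 0 (le_refl _), Nat.zero_add]

-- the heart of the equivalence: both character lists coincide
lemma pv_main (l : List Char) :
    (PySem.List.sorted (l.filter PySem.Chars.isalpha) (fun x => x) false)
      ++ (((PySem.List.sorted ((l.filter PySem.Chars.isdigit).map pvVal) (fun x => x) false).map PySem.Int.toChars).flatten)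
    = pvOrder.flatMap (fun ch => List.replicate (l.count ch) ch) := by
  rw [pv_order_split, List.flatMap_append]
  congr 1
  · -- letters
    rw [pv_sorted_id_flatMap (l.filter PySem.Chars.isalpha) pvLchars (by decide) ?hmem]
    case hmem =>
      intro x hx
      have hax := (List.mem_filter.mp hx).2
      rw [pv_isalpha_iff] at hax
      rw [pvLchars, List.mem_append, pv_mem_map_ofNat_range' 65 26 (by omega) x,
          pv_mem_map_ofNat_range' 97 26 (by omega) x]
      omega
    apply pv_flatMap_congr
    intro c hc
    have hcrng : (65 ≤ c.toNat ∧ c.toNat < 91) ∨ (97 ≤ c.toNat ∧ c.toNat < 123) := by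
      rw [pvLchars, List.mem_append, pv_mem_map_ofNat_range' 65 26 (by omega) c,
          pv_mem_map_ofNat_range' 97 26 (by omega) c] at hc
      omega
    have halpha : PySem.Chars.isalpha c = true := by rw [pv_isalpha_iff]; omega
    rw [List.count_filter halpha]
  · -- digits
    rw [pv_sorted_id_flatMap ((l.filter PySem.Chars.isdigit).map pvVal)
          ([0,1,2,3,4,5,6,7,8,9] : List Int) (by decide) ?hmemD]
    case hmemD =>
      intro x hx
      rcases List.mem_map.mp hx with ⟨c, hc, rfl⟩
      have hdc := (List.mem_filter.mp hc).2
      have := pv_val_digit hdc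
      rw [pv_isdigit_iff] at hdc
      rw [this]
      simp only [List.mem_cons]
      omega
    have hD : pvDchars = ['0','1','2','3','4','5','6','7','8','9'] := by decide
    rw [hD]
    have hblock : ∀ (d : Char), PySem.Chars.isdigit d = true →
        l.count d = ((l.filter PySem.Chars.isdigit).map pvVal).count (pvVal d) := by
      intro d hd
      rw [pv_count_map_val l d hd]
    simp only [List.flatMap_cons, List.flatMap_nil, List.map_append, List.map_replicate,
               List.flatten_append, List.append_nil]
    rw [hblock '0' (by decide), hblock '1' (by decide), hblock '2' (by decide),
        hblock '3' (by decide), hblock '4' (by decide), hblock '5' (by decide),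
        hblock '6' (by decide), hblock '7' (by decide), hblock '8' (by decide),
        hblock '9' (by decide)]
    norm_num [show pvVal '0' = 0 from rfl, show pvVal '1' = 1 from rfl, show pvVal '2' = 2 from rfl,
      show pvVal '3' = 3 from rfl, show pvVal '4' = 4 from rfl, show pvVal '5' = 5 from rfl,
      show pvVal '6' = 6 from rfl, show pvVal '7' = 7 from rfl, show pvVal '8' = 8 from rfl,
      show pvVal '9' = 9 from rfl, show PySem.Int.toChars 0 = ['0'] from rfl,
      show PySem.Int.toChars 1 = ['1'] from rfl, show PySem.Int.toChars 2 = ['2'] from rfl,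
      show PySem.Int.toChars 3 = ['3'] from rfl, show PySem.Int.toChars 4 = ['4'] from rfl,
      show PySem.Int.toChars 5 = ['5'] from rfl, show PySem.Int.toChars 6 = ['6'] from rfl,
      show PySem.Int.toChars 7 = ['7'] from rfl, show PySem.Int.toChars 8 = ['8'] from rfl,
      show PySem.Int.toChars 9 = ['9'] from rfl]

-- ===== VERDICT (by name: the statement is the Claim_ definition above) =====
theorem rearrange_strings_sorted_spec : Claim_equal_rearrange_strings_sorted := by
  intro s _hdom
  unfold Spec_rearrange_strings_sorted rearrange_strings_sorted rearrange_strings_sorted_alt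
  rw [pv_foldA s.toList [] []]
  simp only [List.nil_append, pv_join_nil_flatten, pv_flatten_map_singleton,
             PySem.List.foldl_append_eq_flatMap, PySem.Str.count,
             String.toList_ofList, pv_count_single]
  exact congrArg String.ofList (pv_main s.toList)
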